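-- pv_equiv track=rewrite | github.com/sykim0/coding-practice | 프로그래머스/0/120876. 겹치는 선분의 길이/겹치는 선분의 길이.py | solution
-- ===== SOURCE A (Python) =====
-- def solution(lines):
--     A = [k for k in range(lines[0][0], lines[0][1] + 1)]
--     B = [k for k in range(lines[1][0], lines[1][1] + 1)]
--     C = [k for k in range(lines[2][0], lines[2][1] + 1)]
--
--     AandB = set(A).intersection(set(B))
--     AandC = set(A).intersection(set(C))
--     BandC = set(B).intersection(set(C))
--     AandBandC = (set(A).intersection(set(B))).intersection(set(C))
--
--     all_count = 0
--     if AandBandC.issubset(AandB) : all_count += 1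
--     if AandBandC.issubset(AandC) : all_count += 1
--     if AandBandC.issubset(BandC) : all_count += 1
--     all_count -= 1 #1번은 무조건 있으니
--
--
--     AandB = len(AandB) - 1 if len(AandB) >=2 else 0
--     AandC = len(AandC) - 1 if len(AandC) >=2 else 0
--     BandC = len(BandC) - 1 if len(BandC) >=2 else 0
--     AandBandC = len(AandBandC) - 1 if len(AandBandC) >=2 else 0
--
--     answer = AandB + AandC + BandC - (AandBandC * all_count)
--     return answer
-- ===== SOURCE B (Python) =====
-- def solution(lines):
--     a1, b1 = lines[0][0], lines[0][1]
--     a2, b2 = lines[1][0], lines[1][1]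
--     a3, b3 = lines[2][0], lines[2][1]
--     ab = max(min(b1, b2) - max(a1, a2), 0)
--     ac = max(min(b1, b3) - max(a1, a3), 0)
--     bc = max(min(b2, b3) - max(a2, a3), 0)
--     abc = max(min(b1, b2, b3) - max(a1, a2, a3), 0)
--     return ab + ac + bc - 2 * abc
-- ===== Notes on version B (the rewrite author's own statement) =====
-- stated objective: simpler
-- what changed: B replaces A's enumeration of every integer point of the three segments and materialised set intersections with closed-form interval arithmetic: pairwise and triple overlap lengths via max/min of endpoints, combined by inclusion-exclusion.
import Mathlib
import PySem

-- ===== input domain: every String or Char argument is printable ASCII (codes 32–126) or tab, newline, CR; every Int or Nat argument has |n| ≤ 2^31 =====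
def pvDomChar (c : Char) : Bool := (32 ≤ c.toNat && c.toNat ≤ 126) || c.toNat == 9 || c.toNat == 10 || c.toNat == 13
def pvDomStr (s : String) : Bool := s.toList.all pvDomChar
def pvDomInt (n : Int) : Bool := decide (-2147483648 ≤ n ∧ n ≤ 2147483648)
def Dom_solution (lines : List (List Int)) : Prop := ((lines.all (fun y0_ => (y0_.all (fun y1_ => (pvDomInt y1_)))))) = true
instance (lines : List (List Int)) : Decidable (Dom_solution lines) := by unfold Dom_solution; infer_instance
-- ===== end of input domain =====

-- B replaces A's point-set enumeration and set intersections by closed-form interval arithmetic (max/min of endpoints, inclusion-exclusion); objective: simpler.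

-- ===== PORT A =====
-- lines[i][j], total under Pre_ (both ports read the endpoints the same way)
def pvEnd (lines : List (List Int)) (i j : Int) : Int :=
  PySem.List.pyGetD (PySem.List.pyGetD lines i ([] : List Int)) j 0

def solution (lines : List (List Int)) : Int :=
  let lA := PySem.List.pyRange (pvEnd lines 0 0) (pvEnd lines 0 1 + 1) 1
  let lB := PySem.List.pyRange (pvEnd lines 1 0) (pvEnd lines 1 1 + 1) 1
  let lC := PySem.List.pyRange (pvEnd lines 2 0) (pvEnd lines 2 1 + 1) 1
  let AandB := PySem.Set.inter (PySem.Set.ofList lA) (PySem.Set.ofList lB)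
  let AandC := PySem.Set.inter (PySem.Set.ofList lA) (PySem.Set.ofList lC)
  let BandC := PySem.Set.inter (PySem.Set.ofList lB) (PySem.Set.ofList lC)
  let AandBandC := PySem.Set.inter (PySem.Set.inter (PySem.Set.ofList lA) (PySem.Set.ofList lB)) (PySem.Set.ofList lC)
  let allCount : Int := 0
  let allCount := if PySem.Set.issubset AandBandC AandB then allCount + 1 else allCount
  let allCount := if PySem.Set.issubset AandBandC AandC then allCount + 1 else allCount
  let allCount := if PySem.Set.issubset AandBandC BandC then allCount + 1 else allCount
  let allCount := allCount - 1
  let nAB : Int := if (PySem.Set.len AandB : Int) ≥ 2 then PySem.Set.len AandB - 1 else 0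
  let nAC : Int := if (PySem.Set.len AandC : Int) ≥ 2 then PySem.Set.len AandC - 1 else 0
  let nBC : Int := if (PySem.Set.len BandC : Int) ≥ 2 then PySem.Set.len BandC - 1 else 0
  let nABC : Int := if (PySem.Set.len AandBandC : Int) ≥ 2 then PySem.Set.len AandBandC - 1 else 0
  nAB + nAC + nBC - nABC * allCount

-- ===== PORT B =====
def solution_alt (lines : List (List Int)) : Int :=
  let a1 := pvEnd lines 0 0; let b1 := pvEnd lines 0 1
  let a2 := pvEnd lines 1 0; let b2 := pvEnd lines 1 1
  let a3 := pvEnd lines 2 0; let b3 := pvEnd lines 2 1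
  let ab := max (min b1 b2 - max a1 a2) 0
  let ac := max (min b1 b3 - max a1 a3) 0
  let bc := max (min b2 b3 - max a2 a3) 0
  let abc := max (min b1 (min b2 b3) - max a1 (max a2 a3)) 0
  ab + ac + bc - 2 * abc

-- ===== PRECONDITION & SPEC =====
-- Pre_ excludes exactly the inputs on which A raises IndexError: fewer than three segments, or a segment with fewer than two endpoints.
def Pre_solution (lines : List (List Int)) : Prop :=
  3 ≤ lines.length ∧ 2 ≤ (lines.getD 0 []).length ∧ 2 ≤ (lines.getD 1 []).length ∧ 2 ≤ (lines.getD 2 []).length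
instance (lines : List (List Int)) : Decidable (Pre_solution lines) := by unfold Pre_solution; infer_instance
def pvWitness_solution : List (List Int) := [[0, 2], [1, 3], [2, 4]]

def Spec_solution (lines : List (List Int)) (out : Int) : Prop := out = solution_alt lines
instance (lines : List (List Int)) (out : Int) : Decidable (Spec_solution lines out) := by unfold Spec_solution; infer_instance

-- ===== CLAIM (what is proved, stated in full; the proofs are below) =====
def Claim_equal_solution : Prop := ∀ (lines : List (List Int)), Dom_solution lines → Pre_solution lines → Spec_solution lines (solution lines)

-- ===== LEMMAS AND PROOFS =====

-- the intersection of the integer-point sets of [a1,b1] and [a2,b2] has max(min b − max a + 1, 0) elements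
theorem pv_len_inter2 (a1 b1 a2 b2 : Int) :
    ((PySem.Set.inter (PySem.Set.ofList (PySem.List.pyRange a1 (b1 + 1) 1))
        (PySem.Set.ofList (PySem.List.pyRange a2 (b2 + 1) 1))).length : Int)
      = max (min b1 b2 - max a1 a2 + 1) 0 := by
  have hnd : (PySem.Set.inter (PySem.Set.ofList (PySem.List.pyRange a1 (b1 + 1) 1))
      (PySem.Set.ofList (PySem.List.pyRange a2 (b2 + 1) 1))).Nodup :=
    PySem.Set.nodup_inter _ _ (PySem.Set.nodup_ofList _)
  have hperm : (PySem.Set.inter (PySem.Set.ofList (PySem.List.pyRange a1 (b1 + 1) 1))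
      (PySem.Set.ofList (PySem.List.pyRange a2 (b2 + 1) 1))).Perm
      (PySem.List.pyRange (max a1 a2) (min b1 b2 + 1) 1) := by
    rw [List.perm_ext_iff_of_nodup hnd (PySem.List.nodup_pyRange_one _ _)]
    intro x
    simp [PySem.Set.mem_inter, PySem.Set.mem_ofList, PySem.List.mem_pyRange_one]
    omega
  have hlen := hperm.length_eq
  rw [hlen, PySem.List.length_pyRange_one]
  omega

-- same for the three-way intersection
theorem pv_len_inter3 (a1 b1 a2 b2 a3 b3 : Int) :
    ((PySem.Set.inter (PySem.Set.inter (PySem.Set.ofList (PySem.List.pyRange a1 (b1 + 1) 1))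
        (PySem.Set.ofList (PySem.List.pyRange a2 (b2 + 1) 1)))
        (PySem.Set.ofList (PySem.List.pyRange a3 (b3 + 1) 1))).length : Int)
      = max (min b1 (min b2 b3) - max a1 (max a2 a3) + 1) 0 := by
  have hnd : (PySem.Set.inter (PySem.Set.inter (PySem.Set.ofList (PySem.List.pyRange a1 (b1 + 1) 1))
      (PySem.Set.ofList (PySem.List.pyRange a2 (b2 + 1) 1)))
      (PySem.Set.ofList (PySem.List.pyRange a3 (b3 + 1) 1))).Nodup :=
    PySem.Set.nodup_inter _ _ (PySem.Set.nodup_inter _ _ (PySem.Set.nodup_ofList _))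
  have hperm : (PySem.Set.inter (PySem.Set.inter (PySem.Set.ofList (PySem.List.pyRange a1 (b1 + 1) 1))
      (PySem.Set.ofList (PySem.List.pyRange a2 (b2 + 1) 1)))
      (PySem.Set.ofList (PySem.List.pyRange a3 (b3 + 1) 1))).Perm
      (PySem.List.pyRange (max a1 (max a2 a3)) (min b1 (min b2 b3) + 1) 1) := by
    rw [List.perm_ext_iff_of_nodup hnd (PySem.List.nodup_pyRange_one _ _)]
    intro x
    simp [PySem.Set.mem_inter, PySem.Set.mem_ofList, PySem.List.mem_pyRange_one]
    omega
  have hlen := hperm.length_eq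
  rw [hlen, PySem.List.length_pyRange_one]
  omega

-- the triple intersection is a subset of each pairwise intersection, so every issubset test succeeds
theorem pv_sub12 {α : Type} [BEq α] [LawfulBEq α] (s t u : List α) :
    PySem.Set.issubset (PySem.Set.inter (PySem.Set.inter s t) u) (PySem.Set.inter s t) = true := by
  rw [PySem.Set.issubset_iff]
  intro x hx
  exact ((PySem.Set.mem_inter _ _ _).1 hx).1

theorem pv_sub13 {α : Type} [BEq α] [LawfulBEq α] (s t u : List α) :
    PySem.Set.issubset (PySem.Set.inter (PySem.Set.inter s t) u) (PySem.Set.inter s u) = true := by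
  rw [PySem.Set.issubset_iff]
  intro x hx
  have h := (PySem.Set.mem_inter _ _ _).1 hx
  exact (PySem.Set.mem_inter _ _ _).2 ⟨((PySem.Set.mem_inter _ _ _).1 h.1).1, h.2⟩

theorem pv_sub23 {α : Type} [BEq α] [LawfulBEq α] (s t u : List α) :
    PySem.Set.issubset (PySem.Set.inter (PySem.Set.inter s t) u) (PySem.Set.inter t u) = true := by
  rw [PySem.Set.issubset_iff]
  intro x hx
  have h := (PySem.Set.mem_inter _ _ _).1 hx
  exact (PySem.Set.mem_inter _ _ _).2 ⟨((PySem.Set.mem_inter _ _ _).1 h.1).2, h.2⟩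

-- len ≥ 2 → len − 1, else 0: equals max of the closed segment length and 0
theorem pv_clip (w : Int) :
    (if max (w + 1) 0 ≥ (2 : Int) then max (w + 1) 0 - 1 else 0) = max w 0 := by
  split_ifs <;> omega

theorem pv_final (x y z t : Int) :
    max x 0 + max y 0 + max z 0 - max t 0 * (0 + 1 + 1 + 1 - 1)
      = max x 0 + max y 0 + max z 0 - 2 * max t 0 := by
  omega

-- ===== VERDICT (by name: the statement is the Claim_ definition above) =====
theorem solution_spec : Claim_equal_solution := by
  intro lines _ _
  unfold Spec_solution solution solution_alt
  simp only [pv_sub12, pv_sub13, pv_sub23, if_true, PySem.Set.len]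
  rw [pv_len_inter2, pv_len_inter2, pv_len_inter2, pv_len_inter3,
    pv_clip, pv_clip, pv_clip, pv_clip]
  exact pv_final _ _ _ _
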